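-- pv_equiv track=rewrite | github.com/yongjaenala/Coding_Test_Practice | Ryu/Programmers/Lv0/문자열 밀기.py | solution
-- ===== SOURCE A (Python) =====
-- def solution(A, B):
--     if A == B:          # 같은 경우 제외
--         return 0
--     else:
--         A = list(A)     # A와 B가 string이므로 list로 변경
--         B = list(B)     # string이면 변경 할 수가 없다.
--         answer = 0
--         for i in range(0,len(A)-1):
--             A.insert(0, A[-1])      # A 첫번째 글자에 마지막 글자 추가
--             A.pop(-1)               # A 마지막 글자 삭제
--             answer += 1
--             if (A == B):            # A 와 B가 같을 때 빼냄
--                 return answer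
--         return -1
-- ===== SOURCE B (Python) =====
-- def solution(A, B):
--     # O(n): a right-rotation of A equals B iff A occurs in B+B; the first offset is the count.
--     if A == B:
--         return 0
--     if len(A) != len(B):
--         return -1
--     i = (B + B).find(A)
--     return i if i > 0 else -1
-- ===== Notes on version B (the rewrite author's own statement) =====
-- stated objective: faster
-- what changed: Replaces A's loop that mutates the list one right-rotation at a time and compares it to B on each step by a single substring search: a right-rotation count k works iff A occurs in B+B at offset k, so B returns the first offset of A in B+B (0 and len cases handled by the A==B / length checks).
import Mathlib
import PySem

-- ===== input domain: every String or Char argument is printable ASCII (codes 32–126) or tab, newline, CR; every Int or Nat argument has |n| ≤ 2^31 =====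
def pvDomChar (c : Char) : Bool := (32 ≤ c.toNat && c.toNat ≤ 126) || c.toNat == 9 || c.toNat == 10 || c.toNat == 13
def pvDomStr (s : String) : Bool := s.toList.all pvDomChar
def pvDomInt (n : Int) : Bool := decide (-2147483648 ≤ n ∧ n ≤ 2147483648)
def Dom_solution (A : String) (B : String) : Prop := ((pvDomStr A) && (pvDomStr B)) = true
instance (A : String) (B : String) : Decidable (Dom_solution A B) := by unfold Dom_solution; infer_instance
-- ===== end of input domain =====

-- B replaces A's rotate-one-step-and-compare loop by a single substring search of A in B+B
-- (a right-rotation count k works iff A occurs in B+B at offset k); objective: faster.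

-- ===== PORT A =====
-- the for-loop of A: state = (current list A, answer); early return on A == B
def solGo (b : List Char) : List Char → Int → List Int → Int
  | _, _, [] => -1                                   -- loop fell through: return -1
  | s, ans, _ :: rest =>
    match PySem.List.pyGet? s (-1) with               -- A[-1]
    | none => -1                                      -- IndexError (unreachable: the loop only runs on a non-empty list)
    | some c =>
      let s1 := PySem.List.insert s 0 c               -- A.insert(0, A[-1])
      match PySem.List.pop? s1 (-1) with              -- A.pop(-1)
      | none => -1                                    -- IndexError (unreachable: s1 is non-empty)
      | some (_, s2) =>
        if s2 = b then ans + 1                        -- answer += 1; if A == B: return answer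
        else solGo b s2 (ans + 1) rest

def solution (A : String) (B : String) : Int :=
  if A = B then 0
  else
    let a := A.toList
    let b := B.toList
    solGo b a 0 (PySem.List.pyRange 0 (PySem.List.len a - 1) 1)

-- ===== PORT B =====
def solution_alt (A : String) (B : String) : Int :=
  if A = B then 0
  else if PySem.Str.len A ≠ PySem.Str.len B then -1
  else
    let i := PySem.Chars.find (B.toList ++ B.toList) A.toList   -- (B + B).find(A)
    if 0 < i then i else -1

-- ===== PRECONDITION & SPEC =====
def Spec_solution (A : String) (B : String) (out : Int) : Prop := out = solution_alt A B
instance (A : String) (B : String) (out : Int) : Decidable (Spec_solution A B out) := by unfold Spec_solution; infer_instance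

-- ===== CLAIM (what is proved, stated in full; the proofs are below) =====
def Claim_equal_solution : Prop := ∀ (A : String) (B : String), Dom_solution A B → Spec_solution A B (solution A B)

-- ===== LEMMAS AND PROOFS =====

-- left rotation of b by j (j ≤ |b|): what A must equal for the answer to be j
def pvR (b : List Char) (j : Nat) : List Char := b.drop j ++ b.take j

theorem pvR_zero (b : List Char) : pvR b 0 = b := by simp [pvR]

theorem pvR_length (b : List Char) (j : Nat) : (pvR b j).length = b.length := by
  simp [pvR]; omega

theorem pvR_rotate (b : List Char) (j : Nat) (h : j ≤ b.length) :
    pvR b j = b.rotate j := (List.rotate_eq_drop_append_take h).symm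

-- one iteration of A's loop on a non-empty state
theorem solGo_concat (b ys : List Char) (y : Char) (ans : Int) (x : Int) (rest : List Int) :
    solGo b (ys ++ [y]) ans (x :: rest)
      = if y :: ys = b then ans + 1 else solGo b (y :: ys) (ans + 1) rest := by
  have h1 : PySem.List.pyGet? (ys ++ [y]) (-1) = some y :=
    PySem.List.pyGet?_neg_one_append_singleton ys y
  have h2 : PySem.List.insert (ys ++ [y]) 0 y = y :: (ys ++ [y]) :=
    PySem.List.insert_zero _ y
  have h3 : PySem.List.pop? ((y :: ys) ++ [y]) = some (y, y :: ys) :=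
    PySem.List.pop?_last (y :: ys) y
  simp only [solGo, h1, h2, ← List.cons_append, h3]

-- the rotated state: one loop step sends s to s' with s'.rotate 1 = s
theorem step_rotate (ys : List Char) (y : Char) : (y :: ys).rotate 1 = ys ++ [y] := by
  simp [List.rotate_cons_succ ys y 0]

-- A's loop returns -1 when the state never matches b (lengths may differ)
theorem solGo_ne_len (b : List Char) (l : List Int) :
    ∀ (s : List Char) (ans : Int), s.length ≠ b.length → solGo b s ans l = -1 := by
  induction l with
  | nil => intro s ans _; rfl
  | cons x rest ih =>
    intro s ans hlen
    rcases List.eq_nil_or_concat s with rfl | ⟨ys, y, rfl⟩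
    · simp [solGo, PySem.List.pyGet?_neg_one]
    · rw [List.concat_eq_append, solGo_concat]
      have hne : y :: ys ≠ b := by
        intro h; apply hlen
        rw [← h]; simp
      rw [if_neg hne]
      apply ih
      simpa using hlen

-- A's loop returns -1 when no admissible rotation of b equals the state
theorem solGo_none (b : List Char) (l : List Int) :
    ∀ (s : List Char) (ans : Int), s.length = b.length → l.length < b.length →
    (∀ m : Nat, 1 ≤ m → m ≤ l.length → s ≠ pvR b m) →
    solGo b s ans l = -1 := by
  induction l with
  | nil => intro s ans _ _ _; rfl
  | cons x rest ih =>
    intro s ans hlen hlt hno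
    have hsne : s ≠ [] := by
      intro h; rw [h] at hlen; simp at hlen; omega
    rcases List.eq_nil_or_concat s with rfl | ⟨ys, y, rfl⟩
    · exact absurd rfl hsne
    rw [List.concat_eq_append] at *
    rw [solGo_concat]
    have hrot : (y :: ys).rotate 1 = ys ++ [y] := step_rotate ys y
    have hne : y :: ys ≠ b := by
      intro h
      apply hno 1 le_rfl (by simp)
      rw [pvR_rotate b 1 (by omega), ← h, hrot]
    rw [if_neg hne]
    apply ih _ _ (by simp at hlen ⊢; omega) (by simp at hlt ⊢; omega)
    intro m hm1 hm2 hEq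
    apply hno (m + 1) (by omega) (by simp at hm2 ⊢; omega)
    rw [pvR_rotate b (m+1) (by simp at hlt; omega), ← List.rotate_rotate, ← pvR_rotate b m (by simp at hlt; omega),
        ← hEq, hrot]

-- A's loop returns ans + k when k is the first admissible rotation matching the state
theorem solGo_first (b : List Char) (l : List Int) :
    ∀ (s : List Char) (ans : Int) (k : Nat), s.length = b.length → l.length < b.length →
    1 ≤ k → k ≤ l.length → s = pvR b k →
    (∀ m : Nat, 1 ≤ m → m < k → s ≠ pvR b m) →
    solGo b s ans l = ans + k := by
  induction l with
  | nil => intro s ans k _ _ h1 h2 _ _; simp at h2; omega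
  | cons x rest ih =>
    intro s ans k hlen hlt hk1 hk2 hEq hmin
    have hsne : s ≠ [] := by
      intro h; rw [h] at hlen; simp at hlen
      rw [hEq] at h
      have := pvR_length b k
      rw [h] at this; simp at this; omega
    rcases List.eq_nil_or_concat s with rfl | ⟨ys, y, rfl⟩
    · exact absurd rfl hsne
    rw [List.concat_eq_append] at *
    rw [solGo_concat]
    have hrot : (y :: ys).rotate 1 = ys ++ [y] := step_rotate ys y
    have hbl : (1:Nat) ≤ b.length := by simp at hlt; omega
    rcases Nat.eq_or_lt_of_le hk1 with h1 | hk2'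
    · -- k = 1 : the first step matches
      have hb : y :: ys = b := by
        have h2 : (y :: ys).rotate 1 = b.rotate 1 := by
          rw [hrot, hEq, ← h1, pvR_rotate b 1 hbl]
        exact List.rotate_eq_rotate.mp h2
      rw [if_pos hb, ← h1]
      norm_num
    · -- k ≥ 2 : the first step does not match, recurse with k - 1
      have hne : y :: ys ≠ b := by
        intro h
        apply hmin 1 le_rfl hk2'
        rw [pvR_rotate b 1 hbl, ← h, hrot]
      rw [if_neg hne]
      have hstep : y :: ys = pvR b (k - 1) := by
        have h2 : (y :: ys).rotate 1 = (pvR b (k - 1)).rotate 1 := by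
          rw [hrot, hEq, pvR_rotate b k (by simp at hk2 hlt; omega),
              pvR_rotate b (k-1) (by simp at hk2 hlt; omega), List.rotate_rotate]
          congr 1; omega
        exact List.rotate_eq_rotate.mp h2
      rw [ih _ _ (k - 1) (by simp at hlen ⊢; omega) (by simp at hlt ⊢; omega)
            (by omega) (by simp at hk2 ⊢; omega) hstep ?_]
      · omega
      · intro m hm1 hm2 hEq'
        apply hmin (m + 1) (by omega) (by omega)
        rw [pvR_rotate b (m+1) (by simp at hk2 hlt; omega), ← List.rotate_rotate,
            ← pvR_rotate b m (by simp at hk2 hlt; omega), ← hEq', hrot]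

-- a rotation of b is a prefix of (b ++ b) dropped at its offset
theorem pvR_prefix_drop (b : List Char) (m : Nat) (hm : m ≤ b.length) :
    pvR b m <+: (b ++ b).drop m := by
  rw [List.drop_append_of_le_length hm]
  exact (List.prefix_append_right_inj (b.drop m)).mpr (List.take_prefix m b)

-- hence it is an infix of b ++ b
theorem pvR_infix (b : List Char) (m : Nat) (hm : m ≤ b.length) :
    pvR b m <:+: b ++ b :=
  (pvR_prefix_drop b m hm).isInfix.trans (List.drop_suffix m (b ++ b)).isInfix

theorem main_eq (A : String) (B : String) : solution A B = solution_alt A B := by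
  by_cases hAB : A = B
  · simp [solution, solution_alt, hAB]
  · have hab : A.toList ≠ B.toList := fun h => hAB (String.toList_inj.mp h)
    simp only [solution, solution_alt, if_neg hAB]
    have hrlen : (PySem.List.pyRange 0 (PySem.List.len A.toList - 1) 1).length
        = A.toList.length - 1 := by
      rw [PySem.List.len_eq, PySem.List.length_pyRange_one]; omega
    by_cases hlen : A.toList.length = B.toList.length
    · rw [if_neg (by simp [PySem.Str.len_eq, hlen])]
      have hb0 : B.toList.length ≠ 0 := by
        intro h0
        exact hab (by
          rw [show A.toList = [] from List.eq_nil_iff_length_eq_zero.mpr (by omega),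
              show B.toList = [] from List.eq_nil_iff_length_eq_zero.mpr h0])
      by_cases hneg : PySem.Chars.find (B.toList ++ B.toList) A.toList = -1
      · rw [if_neg (by omega)]
        apply solGo_none _ _ _ _ hlen (by omega)
        intro m _ hm2 hEqm
        rw [hrlen] at hm2
        exact (PySem.Chars.find_eq_neg_one_iff _ _).mp hneg
          (by rw [hEqm]; exact pvR_infix _ m (by omega))
      · have hpos : 0 ≤ PySem.Chars.find (B.toList ++ B.toList) A.toList := by
          have := PySem.Chars.neg_one_le_find (B.toList ++ B.toList) A.toList; omega
        obtain ⟨hpre, hmin⟩ := PySem.Chars.find_spec hpos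
        have hik : PySem.Chars.find (B.toList ++ B.toList) A.toList
            = ((PySem.Chars.find (B.toList ++ B.toList) A.toList).toNat : Int) :=
          (Int.toNat_of_nonneg hpos).symm
        set k := (PySem.Chars.find (B.toList ++ B.toList) A.toList).toNat with hkdef
        have hkle : k ≤ B.toList.length := by
          have hl := hpre.length_le
          simp only [List.length_drop, List.length_append] at hl
          omega
        have haR : A.toList = pvR B.toList k := by
          have ht := List.prefix_iff_eq_take.mp hpre
          rw [ht, List.drop_append_of_le_length hkle, List.take_append,
              List.take_of_length_le (by simp only [List.length_drop]; omega), hlen]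
          have h4 : B.toList.length - (List.drop k B.toList).length = k := by
            simp only [List.length_drop]; omega
          rw [h4]; rfl
        have hk0 : k ≠ 0 := by
          intro h0; exact hab (by rw [haR, h0, pvR_zero])
        have hkn : k ≠ B.toList.length := by
          intro hn
          exact hab (by rw [haR, hn]; unfold pvR; rw [List.drop_length, List.take_length]; exact List.nil_append _)
        rw [if_pos (by omega)]
        rw [solGo_first _ _ _ 0 k hlen (by omega) (by omega)
              (by rw [hrlen]; omega) haR ?_]
        · omega
        · intro m hm1 hm2 hEqm
          exact hmin m (by omega) (by rw [hEqm]; exact pvR_prefix_drop _ m (by omega))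
    · rw [if_pos (by simp only [PySem.Str.len_eq, ne_eq, Int.natCast_inj]; exact hlen)]
      exact solGo_ne_len _ _ _ _ hlen

-- ===== VERDICT (by name: the statement is the Claim_ definition above) =====
theorem solution_spec : Claim_equal_solution := by
  intro A B _
  exact main_eq A B
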